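-- pv_equiv track=rewrite | github.com/nightowlish/AlgoExpert-Python-Solutions | hard/numbers_in_pi.py | recursiveNumbersInString
-- ===== SOURCE A (Python) =====
-- def recursiveNumbersInString(string, numbers, cache):
--     if string in cache:
--         return cache[string]
--     if string in numbers:
--         return 1
--     if len(string) == 1:
--         return None
--     min_spaces = None
--     for index in range(1, len(string)):
--         current_prefix = string[:index]
--         remaining_string = string[index:]
--         if not current_prefix in numbers:
--             continue
--         if not remaining_string in cache:
--             remaining_spaces = recursiveNumbersInString(remaining_string, numbers, cache)
--             cache[remaining_string] = remaining_spaces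
--         current_spaces = cache[remaining_string] + 1 if not cache[remaining_string] is None else None
--         if current_spaces is None:
--             continue
--         min_spaces = current_spaces if min_spaces is None else min(min_spaces, current_spaces)
--     return min_spaces
-- ===== SOURCE B (Python) =====
-- # Bottom-up DP over the suffixes of `string` (shortest to longest), replacing A's
-- # memoized recursion; equivalence is about the RETURN value only: unlike A, B does
-- # not mutate `cache` (A inserts computed suffix results into it).
-- def recursiveNumbersInString(string, numbers, cache):
--     number_set = set(numbers)
--     n = len(string)
--     best = []  # best[k] = minimal piece count for the suffix of length k (None if impossible)
--     for k in range(0, n + 1):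
--         suffix = string[n - k:]
--         if suffix in cache:
--             val = cache[suffix]
--         elif suffix in number_set:
--             val = 1
--         else:
--             val = None
--             for i in range(1, k):
--                 rest = best[k - i]
--                 if suffix[:i] in number_set and rest is not None:
--                     if val is None or rest + 1 < val:
--                         val = rest + 1
--         best.append(val)
--     return best[n]
-- ===== Notes on version B (the rewrite author's own statement) =====
-- stated objective: alternative
-- what changed: Replaces A's memoized top-down recursion (which mutates the cache dict) by an iterative bottom-up DP over suffixes of increasing length, indexing a table of suffix results instead of recursing; the return value is identical, but B never mutates cache.
import Mathlib
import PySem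

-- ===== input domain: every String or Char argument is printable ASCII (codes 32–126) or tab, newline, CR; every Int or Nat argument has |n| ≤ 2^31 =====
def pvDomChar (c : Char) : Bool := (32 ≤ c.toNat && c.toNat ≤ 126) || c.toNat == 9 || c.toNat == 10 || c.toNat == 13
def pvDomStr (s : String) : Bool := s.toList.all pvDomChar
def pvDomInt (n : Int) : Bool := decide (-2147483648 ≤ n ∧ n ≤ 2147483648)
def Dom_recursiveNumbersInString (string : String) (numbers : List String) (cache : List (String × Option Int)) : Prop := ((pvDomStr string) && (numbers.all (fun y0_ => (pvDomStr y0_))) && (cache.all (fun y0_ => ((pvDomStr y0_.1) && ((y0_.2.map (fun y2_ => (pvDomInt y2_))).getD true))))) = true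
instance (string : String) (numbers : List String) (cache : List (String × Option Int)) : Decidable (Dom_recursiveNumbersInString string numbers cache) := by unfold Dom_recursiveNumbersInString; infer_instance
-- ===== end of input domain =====

-- B replaces A's memoized top-down recursion (which mutates `cache`) by a bottom-up DP
-- table over suffixes; equivalence is about the RETURN value only (A mutates its cache
-- argument in Python, B does not).


-- ===== PORT A =====
-- A's recursion, on `List Char` (String equality/membership is exactly List Char
-- equality/membership, so converting the inputs once is exact). The Python `for` loop
-- with `continue` is pvLoopA (Python `index` = i + 1); the dict argument is threaded as
-- state, exactly as Python mutates it.
mutual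
def pvGoA (NL : List (List Char)) (t : List Char) (c : PySem.Dict (List Char) (Option Int)) :
    Option Int × PySem.Dict (List Char) (Option Int) :=
  match PySem.Dict.get? c t with
  | some v => (v, c)                               -- if string in cache: return cache[string]
  | none =>
    if t ∈ NL then (some 1, c)                     -- if string in numbers: return 1
    else if t.length = 1 then (none, c)            -- if len(string) == 1: return None
    else pvLoopA NL t c 0 none
termination_by 3 * t.length + 2
decreasing_by omega
def pvLoopA (NL : List (List Char)) (t : List Char) (c : PySem.Dict (List Char) (Option Int))
    (i : Nat) (ms : Option Int) : Option Int × PySem.Dict (List Char) (Option Int) :=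
  if h : i + 1 < t.length then                     -- for index in range(1, len(string))
    if t.take (i + 1) ∈ NL then                    -- if not current_prefix in numbers: continue
      match PySem.Dict.get? c (t.drop (i + 1)) with  -- if not remaining_string in cache: …
      | some r0 =>                                 -- cache hit: cache[remaining_string] = r0
        (match r0 with                             -- current_spaces = cache[rem] + 1 if … else None
         | some v => pvLoopA NL t c (i + 1)
             (match ms with | none => some (v + 1) | some m => some (min m (v + 1)))
         | none => pvLoopA NL t c (i + 1) ms)      -- if current_spaces is None: continue
      | none =>
        let r := pvGoA NL (t.drop (i + 1)) c       -- remaining_spaces = recursive(…)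
        let c1 := PySem.Dict.insert r.2 (t.drop (i + 1)) r.1   -- cache[remaining_string] = …
        (match PySem.Dict.get? c1 (t.drop (i + 1)) with        -- current_spaces = cache[rem] + 1 …
         | some (some v) => pvLoopA NL t c1 (i + 1)
             (match ms with | none => some (v + 1) | some m => some (min m (v + 1)))
         | _ => pvLoopA NL t c1 (i + 1) ms)
    else pvLoopA NL t c (i + 1) ms
  else (ms, c)
termination_by 3 * t.length - i
decreasing_by all_goals ((try simp only [List.length_drop]); omega)
end

def recursiveNumbersInString (string : String) (numbers : List String) (cache : List (String × Option Int)) : Option Int :=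
  (pvGoA (numbers.map String.toList) string.toList
    (PySem.Dict.mk (cache.map (fun p => (p.1.toList, p.2))))).1

-- ===== PORT B =====
-- B's inner loop `for i in range(1, k)` (Source B); best[k-i] is always in range (1 ≤ i ≤ k-1,
-- best.length = k when called), so getD is exact.
def pvInner (N : PySem.Set (List Char)) (suffix : List Char) (best : List (Option Int)) (k : Nat) : Option Int :=
  (List.range' 1 (k - 1)).foldl (fun val i =>
    let rest := best.getD (k - i) none             -- rest = best[k - i]
    if PySem.Set.contains N (suffix.take i) then   -- if suffix[:i] in number_set and rest is not None:
      match rest with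
      | some r =>
        (match val with                            -- if val is None or rest + 1 < val: val = rest + 1
         | none => some (r + 1)
         | some v => if r + 1 < v then some (r + 1) else some v)
      | none => val
    else val) none

-- one iteration of Source B's outer loop (suffix = string[n-k:], n-k ≥ 0 so the slice is drop)
def pvStepB (N : PySem.Set (List Char)) (C : PySem.Dict (List Char) (Option Int)) (s : List Char)
    (best : List (Option Int)) (k : Nat) : List (Option Int) :=
  let suffix := s.drop (s.length - k)
  let val : Option Int :=
    match PySem.Dict.get? C suffix with            -- if suffix in cache: val = cache[suffix]
    | some v => v
    | none =>
      if PySem.Set.contains N suffix then some 1   -- elif suffix in number_set: val = 1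
      else pvInner N suffix best k
  best ++ [val]                                    -- best.append(val)

def recursiveNumbersInString_alt (string : String) (numbers : List String) (cache : List (String × Option Int)) : Option Int :=
  let s := string.toList
  let numberSet : PySem.Set (List Char) := PySem.Set.ofList (numbers.map String.toList)
  let cd : PySem.Dict (List Char) (Option Int) := PySem.Dict.mk (cache.map (fun p => (p.1.toList, p.2)))
  let best := (List.range (s.length + 1)).foldl (pvStepB numberSet cd s) []   -- for k in range(0, n+1)
  best.getD s.length none                          -- return best[n] (best.length = n+1, in range)

-- ===== PRECONDITION & SPEC =====
def Spec_recursiveNumbersInString (string : String) (numbers : List String) (cache : List (String × Option Int)) (out : Option Int) : Prop := out = recursiveNumbersInString_alt string numbers cache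
instance (string : String) (numbers : List String) (cache : List (String × Option Int)) (out : Option Int) : Decidable (Spec_recursiveNumbersInString string numbers cache out) := by unfold Spec_recursiveNumbersInString; infer_instance

-- ===== CLAIM (what is proved, stated in full; the proofs are below) =====
def Claim_equal_recursiveNumbersInString : Prop := ∀ (string : String) (numbers : List String) (cache : List (String × Option Int)), Dom_recursiveNumbersInString string numbers cache → Spec_recursiveNumbersInString string numbers cache (recursiveNumbersInString string numbers cache)

-- ===== LEMMAS AND PROOFS =====

-- the common specification: pvF NL C t = the answer for t against number list NL and
-- initial cache C, by recursion on suffix length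
def pvBody (NL : List (List Char)) (_C : PySem.Dict (List Char) (Option Int)) (t : List Char)
    (F : List Char → Option Int) (val : Option Int) (i : Nat) : Option Int :=
  if t.take i ∈ NL then
    match F (t.drop i) with
    | some r =>
      (match val with
       | none => some (r + 1)
       | some v => if r + 1 < v then some (r + 1) else some v)
    | none => val
  else val

def pvF (NL : List (List Char)) (C : PySem.Dict (List Char) (Option Int)) (t : List Char) : Option Int :=
  match PySem.Dict.get? C t with
  | some v => v
  | none =>
    if t ∈ NL then some 1
    else (List.range' 1 (t.length - 1)).foldl
      (fun val i =>
        pvBody NL C t (fun u => if _hu : u.length < t.length then pvF NL C u else none) val i) none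
termination_by t.length
decreasing_by exact _hu

theorem pvF_eq (NL : List (List Char)) (C : PySem.Dict (List Char) (Option Int)) (t : List Char) :
    pvF NL C t =
      match PySem.Dict.get? C t with
      | some v => v
      | none =>
        if t ∈ NL then some 1
        else (List.range' 1 (t.length - 1)).foldl (pvBody NL C t (pvF NL C)) none := by
  conv_lhs => rw [pvF]
  cases hc : PySem.Dict.get? C t with
  | some v => rfl
  | none =>
    by_cases hn : t ∈ NL
    · simp [hn]
    · simp only [if_neg hn]
      refine PySem.List.foldl_congr_mem' _ _ _ _ ?_
      intro i hi acc
      obtain ⟨h1, h2⟩ := List.mem_range'_1.mp hi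
      unfold pvBody
      simp only []
      rw [dif_pos (by simp only [List.length_drop]; omega)]

-- cache invariant: every key answers either as the initial cache C does, or (for keys C
-- does not know) with the true value pvF
def pvInv (NL : List (List Char)) (C c : PySem.Dict (List Char) (Option Int)) : Prop :=
  ∀ k, PySem.Dict.get? c k = PySem.Dict.get? C k ∨
    (PySem.Dict.get? C k = none ∧ PySem.Dict.get? c k = some (pvF NL C k))

theorem pvInv_some (NL : List (List Char)) (C c : PySem.Dict (List Char) (Option Int))
    (h : pvInv NL C c) (k : List Char) (v : Option Int)
    (hk : PySem.Dict.get? c k = some v) : v = pvF NL C k := by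
  rcases h k with h1 | ⟨h2, h3⟩
  · rw [pvF_eq, ← h1, hk]
  · rw [hk] at h3; exact Option.some.inj h3

theorem pvInv_noneC (NL : List (List Char)) (C c : PySem.Dict (List Char) (Option Int))
    (h : pvInv NL C c) (k : List Char)
    (hk : PySem.Dict.get? c k = none) : PySem.Dict.get? C k = none := by
  rcases h k with h1 | ⟨h2, _⟩
  · rw [← h1]; exact hk
  · exact h2

theorem pvGoA_eq (NL : List (List Char)) (C : PySem.Dict (List Char) (Option Int)) :
    ∀ (t : List Char) (c : PySem.Dict (List Char) (Option Int)), pvInv NL C c →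
      (pvGoA NL t c).1 = pvF NL C t ∧ pvInv NL C (pvGoA NL t c).2 := by
  suffices H : ∀ (n : Nat) (t : List Char) (c : PySem.Dict (List Char) (Option Int)),
      t.length ≤ n → pvInv NL C c →
      (pvGoA NL t c).1 = pvF NL C t ∧ pvInv NL C (pvGoA NL t c).2 by
    exact fun t c h => H t.length t c le_rfl h
  intro n
  induction n using Nat.strong_induction_on with
  | _ n IH =>
  intro t c hlen hinv
  have loopEq : ∀ (fuel i : Nat) (c' : PySem.Dict (List Char) (Option Int)) (ms : Option Int),
      t.length - 1 - i = fuel → pvInv NL C c' →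
      (pvLoopA NL t c' i ms).1
          = (List.range' (i + 1) (t.length - 1 - i)).foldl (pvBody NL C t (pvF NL C)) ms
        ∧ pvInv NL C (pvLoopA NL t c' i ms).2 := by
    intro fuel
    induction fuel with
    | zero =>
      intro i c' ms hf hinv'
      rw [pvLoopA, dif_neg (by omega), hf]
      exact ⟨rfl, hinv'⟩
    | succ fuel ihf =>
      intro i c' ms hf hinv'
      have hlt : i + 1 < t.length := by omega
      have hcount : t.length - 1 - (i + 1) = fuel := by omega
      rw [pvLoopA, dif_pos hlt, hf, List.range'_succ, List.foldl_cons]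
      dsimp only
      by_cases hp : t.take (i + 1) ∈ NL
      · rw [if_pos hp]
        have hbody : ∀ acc : Option Int, pvBody NL C t (pvF NL C) acc (i + 1) =
            (match pvF NL C (t.drop (i + 1)) with
             | some r => (match acc with
                          | none => some (r + 1)
                          | some v => if r + 1 < v then some (r + 1) else some v)
             | none => acc) := by intro acc; unfold pvBody; rw [if_pos hp]
        have hmin : ∀ v : Int, (match ms with
              | none => some (v + 1) | some m => some (min m (v + 1)))
            = (match ms with
              | none => some (v + 1)
              | some m => if v + 1 < m then some (v + 1) else some m : Option Int) := by
          intro v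
          cases ms with
          | none => rfl
          | some m =>
            simp only [Int.min_def]
            split_ifs <;> first | rfl | omega
        cases hcr : PySem.Dict.get? c' (t.drop (i + 1)) with
        | some r0 =>
          have hr0 : r0 = pvF NL C (t.drop (i + 1)) := pvInv_some NL C c' hinv' _ _ hcr
          cases hF : pvF NL C (t.drop (i + 1)) with
          | some v =>
            rw [hr0, hF, hbody, hF]
            dsimp only
            rw [hmin, ← hcount]
            exact ihf (i + 1) c' _ hcount hinv'
          | none =>
            rw [hr0, hF, hbody, hF]
            dsimp only
            rw [← hcount]
            exact ihf (i + 1) c' ms hcount hinv'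
        | none =>
          have hCnone : PySem.Dict.get? C (t.drop (i + 1)) = none :=
            pvInv_noneC NL C c' hinv' _ hcr
          have hrec := IH (t.drop (i + 1)).length
            (by simp only [List.length_drop]; omega) (t.drop (i + 1)) c' le_rfl hinv'
          set r := pvGoA NL (t.drop (i + 1)) c' with hr
          set c1 := PySem.Dict.insert r.2 (t.drop (i + 1)) r.1 with hc1
          have hInv1 : pvInv NL C c1 := by
            intro k
            by_cases hk : k = t.drop (i + 1)
            · subst hk
              exact Or.inr ⟨hCnone, by rw [hc1, PySem.Dict.get?_insert_self, hrec.1]⟩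
            · have : PySem.Dict.get? c1 k = PySem.Dict.get? r.2 k := by
                rw [hc1]; exact PySem.Dict.get?_insert_of_ne _ _ hk
              rw [this]; exact hrec.2 k
          have hget1 : PySem.Dict.get? c1 (t.drop (i + 1))
              = some (pvF NL C (t.drop (i + 1))) := by
            rw [hc1, PySem.Dict.get?_insert_self, hrec.1]
          cases hF : pvF NL C (t.drop (i + 1)) with
          | some v =>
            rw [hF] at hget1
            rw [hget1, hbody, hF]
            dsimp only
            rw [hmin, ← hcount]
            exact ihf (i + 1) c1 _ hcount hInv1
          | none =>
            rw [hF] at hget1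
            rw [hget1, hbody, hF]
            dsimp only
            rw [← hcount]
            exact ihf (i + 1) c1 ms hcount hInv1
      · rw [if_neg hp]
        have hbody : pvBody NL C t (pvF NL C) ms (i + 1) = ms := by
          unfold pvBody; rw [if_neg hp]
        rw [hbody, ← hcount]
        exact ihf (i + 1) c' ms hcount hinv'
  rw [pvGoA]
  cases hc : PySem.Dict.get? c t with
  | some v =>
    dsimp only
    exact ⟨pvInv_some NL C c hinv t v hc, hinv⟩
  | none =>
    dsimp only
    have hCn : PySem.Dict.get? C t = none := pvInv_noneC NL C c hinv t hc
    rw [pvF_eq, hCn]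
    dsimp only
    by_cases hn : t ∈ NL
    · simp only [if_pos hn]; exact ⟨trivial, hinv⟩
    · simp only [if_neg hn]
      by_cases h1 : t.length = 1
      · rw [if_pos h1, h1]; exact ⟨rfl, hinv⟩
      · rw [if_neg h1]
        simpa using loopEq (t.length - 1 - 0) 0 c none rfl hinv

theorem pvTable_eq (NL : List (List Char)) (C : PySem.Dict (List Char) (Option Int)) (s : List Char) :
    ∀ m, m ≤ s.length + 1 →
      (List.range m).foldl (pvStepB (PySem.Set.ofList NL) C s) [] =
        (List.range m).map (fun k => pvF NL C (s.drop (s.length - k))) := by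
  intro m
  induction m with
  | zero => intro _; rfl
  | succ m ih =>
    intro hm
    rw [List.range_succ, List.foldl_append, List.map_append, ih (by omega)]
    simp only [List.foldl_cons, List.foldl_nil]
    unfold pvStepB
    dsimp only
    simp only [List.map_cons, List.map_nil]
    congr 1
    have hum : (s.drop (s.length - m)).length = m := by simp only [List.length_drop]; omega
    rw [pvF_eq]
    cases hc : PySem.Dict.get? C (s.drop (s.length - m)) with
    | some v => simp only []
    | none =>
      simp only []
      have hbr : ∀ x : List Char, PySem.Set.contains (PySem.Set.ofList (NL)) x = decide (x ∈ NL) := by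
        intro x; simp [pysem]
      by_cases hn : s.drop (s.length - m) ∈ NL
      · simp [hn]
      · simp only [hbr, hn, decide_false, Bool.false_eq_true, if_false]
        unfold pvInner
        rw [hum]
        congr 1
        refine PySem.List.foldl_congr_mem' _ _ _ _ ?_
        intro i hi acc
        obtain ⟨h1, h2⟩ := List.mem_range'_1.mp hi
        unfold pvBody
        simp only [hbr]
        have hrest : (((List.range m).map (fun k => pvF NL C (s.drop (s.length - k)))).getD (m - i) none)
            = pvF NL C (s.drop (s.length - (m - i))) := by
          have hlt : m - i < m := by omega
          simp [List.getD, hlt]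
        have hdd : (s.drop (s.length - m)).drop i = s.drop (s.length - (m - i)) := by
          rw [List.drop_drop]
          congr 1
          omega
        rw [hrest, hdd]
        simp only [decide_eq_true_eq]

-- ===== VERDICT (by name: the statement is the Claim_ definition above) =====
theorem recursiveNumbersInString_spec : Claim_equal_recursiveNumbersInString := by
  intro string numbers cache _
  unfold Spec_recursiveNumbersInString recursiveNumbersInString recursiveNumbersInString_alt
  dsimp only
  rw [pvTable_eq (numbers.map String.toList)
      (PySem.Dict.mk (cache.map (fun p => (p.1.toList, p.2)))) string.toList
      (string.toList.length + 1) le_rfl]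
  rw [(pvGoA_eq (numbers.map String.toList)
      (PySem.Dict.mk (cache.map (fun p => (p.1.toList, p.2)))) string.toList
      (PySem.Dict.mk (cache.map (fun p => (p.1.toList, p.2))))
      (fun _ => Or.inl rfl)).1]
  simp [List.getD]
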